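-- pv_equiv track=rewrite | github.com/igorek3k/llmteatas | aia/t3/3zadacha.py | third_line
-- ===== SOURCE A (Python) =====
-- def third_line(str1, str2):
--     result = ""
--     min_len = min(len(str1), len(str2))
--     for i in range(min_len):
--         if i % 2 == 0:
--             result += str1[i]
--         else:
--             result += str2[i]
--     return result
-- ===== SOURCE B (Python) =====
-- def third_line(str1, str2):
--     # stride-2 merge: no per-index parity branch; pairs (str1[i], str2[i+1]) then a possible leftover char
--     m = min(len(str1), len(str2))
--     out = []
--     i = 0
--     while i + 1 < m:
--         out.append(str1[i])
--         out.append(str2[i + 1])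
--         i += 2
--     if i < m:
--         out.append(str1[i])
--     return "".join(out)
-- ===== Notes on version B (the rewrite author's own statement) =====
-- stated objective: alternative
-- what changed: Replaces the per-index parity branch with a stride-2 loop that emits a (str1[i], str2[i+1]) pair per step plus a possible leftover char, collected in a list and joined once.
import Mathlib
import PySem

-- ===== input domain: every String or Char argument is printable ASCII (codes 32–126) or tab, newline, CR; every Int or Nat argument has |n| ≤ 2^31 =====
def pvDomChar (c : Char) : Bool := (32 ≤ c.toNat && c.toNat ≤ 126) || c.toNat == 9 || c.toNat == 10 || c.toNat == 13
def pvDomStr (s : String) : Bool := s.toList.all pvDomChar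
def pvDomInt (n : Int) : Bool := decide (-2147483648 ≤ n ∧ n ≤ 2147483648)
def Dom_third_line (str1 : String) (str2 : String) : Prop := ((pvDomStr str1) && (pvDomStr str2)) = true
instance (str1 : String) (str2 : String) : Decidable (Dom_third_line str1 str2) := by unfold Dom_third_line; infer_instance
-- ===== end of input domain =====

-- B replaces A's per-index parity branch (and repeated string +=) with a stride-2 pair loop plus a leftover char, joined once.

-- ===== PORT A =====
def third_line (str1 : String) (str2 : String) : String :=
  let l1 := str1.toList
  let l2 := str2.toList
  let min_len : Int := min (PySem.Str.len str1) (PySem.Str.len str2)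
  let result : List Char :=
    (PySem.List.pyRange 0 min_len 1).foldl
      (fun acc i =>
        if PySem.Int.mod i 2 = 0 then acc ++ [PySem.List.pyGetD l1 i ' ']
        else acc ++ [PySem.List.pyGetD l2 i ' ']) []
  String.ofList result

-- ===== PORT B =====
-- B's while loop: while i + 1 < m emit (str1[i], str2[i+1]) and i += 2; the trailing `if i < m` is the base case.
def third_line_alt_loop (l1 l2 : List Char) (m i : Nat) (out : List Char) : List Char :=
  if i + 1 < m then
    third_line_alt_loop l1 l2 m (i + 2)
      (out ++ [PySem.List.pyGetD l1 (i : Int) ' ', PySem.List.pyGetD l2 ((i : Int) + 1) ' '])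
  else if i < m then out ++ [PySem.List.pyGetD l1 (i : Int) ' ']
  else out
termination_by m - i

def third_line_alt (str1 : String) (str2 : String) : String :=
  String.ofList
    (third_line_alt_loop str1.toList str2.toList (min str1.toList.length str2.toList.length) 0 [])

-- ===== PRECONDITION & SPEC =====
def Spec_third_line (str1 : String) (str2 : String) (out : String) : Prop := out = third_line_alt str1 str2
instance (str1 : String) (str2 : String) (out : String) : Decidable (Spec_third_line str1 str2 out) := by unfold Spec_third_line; infer_instance

-- ===== CLAIM (what is proved, stated in full; the proofs are below) =====
def Claim_equal_third_line : Prop := ∀ (str1 : String) (str2 : String), Dom_third_line str1 str2 → Spec_third_line str1 str2 (third_line str1 str2)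

-- ===== LEMMAS AND PROOFS =====

-- the common normal form: output position k takes l1[k] when k is even, l2[k] when odd
def pvMixF (l1 l2 : List Char) (k : Nat) : Char :=
  if k % 2 = 0 then l1.getD k ' ' else l2.getD k ' '

theorem third_line_alt_loop_eq (l1 l2 : List Char) (m : Nat) :
    ∀ (k i : Nat) (out : List Char), m - i = k → i % 2 = 0 →
      third_line_alt_loop l1 l2 m i out = out ++ (List.range' i (m - i)).map (pvMixF l1 l2) := by
  intro k
  induction k using Nat.strong_induction_on with
  | _ k ih =>
    intro i out hk hev
    unfold third_line_alt_loop
    split_ifs with h1 h2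
    · have hm : m - i = (m - (i + 2)) + 1 + 1 := by omega
      rw [ih (m - (i + 2)) (by omega) (i + 2) _ rfl (by omega), hm, List.range'_succ,
        List.range'_succ]
      have e1 : pvMixF l1 l2 i = l1.getD i ' ' := by simp [pvMixF, hev]
      have e2 : pvMixF l1 l2 (i + 1) = l2.getD (i + 1) ' ' := by
        have h : (i + 1) % 2 = 1 := by omega
        simp [pvMixF, h]
      have e3 : (i : Int) + 1 = ((i + 1 : Nat) : Int) := by push_cast; ring
      rw [e3]
      simp only [PySem.List.pyGetD_natCast, e1, e2, List.map_cons, List.append_assoc,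
        List.cons_append, List.nil_append]
    · have hm : m - i = 1 := by omega
      rw [hm, List.range'_succ]
      simp [pvMixF, hev, PySem.List.pyGetD_natCast]
    · have hm : m - i = 0 := by omega
      simp [hm]

theorem third_line_eq_map (str1 str2 : String) :
    third_line str1 str2 =
      String.ofList ((List.range (min str1.toList.length str2.toList.length)).map
        (pvMixF str1.toList str2.toList)) := by
  unfold third_line
  simp only [PySem.Str.len_eq]
  have hmin : min ((str1.toList.length : Int)) ((str2.toList.length : Int))
      = ((min str1.toList.length str2.toList.length : Nat) : Int) := by
    push_cast; omega
  rw [hmin, PySem.List.pyRange_one]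
  rw [List.foldl_map]
  have step : ∀ (acc : List Char) (k : Nat),
      (fun (acc : List Char) (i : Int) =>
        if PySem.Int.mod i 2 = 0 then acc ++ [PySem.List.pyGetD str1.toList i ' ']
        else acc ++ [PySem.List.pyGetD str2.toList i ' ']) acc ((0 : Int) + (k : Int))
      = acc ++ [pvMixF str1.toList str2.toList k] := by
    intro acc k
    have hmod : PySem.Int.mod (k : Int) 2 = ((k % 2 : Nat) : Int) := by
      exact_mod_cast PySem.Int.mod_natCast k 2
    simp only [zero_add, hmod, PySem.List.pyGetD_natCast, pvMixF, Nat.cast_eq_zero]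
    split_ifs <;> rfl
  simp only [step]
  rw [PySem.List.foldl_append_singleton_eq_map]
  simp only [List.nil_append]
  congr 2

theorem third_line_spec' (str1 str2 : String) :
    third_line str1 str2 = third_line_alt str1 str2 := by
  rw [third_line_eq_map]
  unfold third_line_alt
  rw [third_line_alt_loop_eq _ _ _ _ 0 [] rfl rfl]
  simp [List.range_eq_range']

-- ===== VERDICT (by name: the statement is the Claim_ definition above) =====
theorem third_line_spec : Claim_equal_third_line := by
  intro str1 str2 _
  unfold Spec_third_line
  exact third_line_spec' str1 str2
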